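-- pv_equiv track=rewrite | github.com/Nareeek/Codesignal_tasks | sequenceElement.py | sequenceElement
-- ===== SOURCE A (Python) =====
-- def sequenceElement(a, n):
--
--     MOD = 10**5
--     seq = []
--     for i in range(5):
--         seq.append(a[i])
--
--     lastFive = (a[0] * 10**4 + a[1] * 10**3 +
--                 a[2] * 10**2 + a[3] * 10**1 + a[4])
--     was = {}
--     was[lastFive] = 4
--
--     i = 5
--     while True:
--         seq.append((seq[i - 1] + seq[i - 2] +
--                     seq[i - 3] + seq[i - 4] + seq[i - 5]) % 10)
--         lastFive = (lastFive * 10 + seq[i]) % MOD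
--         if lastFive in was:
--             last = was[lastFive]
--             return seq[n % (i - last)]
--         else:
--             was[lastFive] = i
--         i += 1
-- ===== SOURCE B (Python) =====
-- def sequenceElement(a, n):
--     MOD = 10**5
--     # Phase 1: find the period of the last-five-digits state stream using a
--     # rolling 5-window instead of materialising the whole sequence.
--     w = (a[0], a[1], a[2], a[3], a[4])
--     state = w[0] * 10**4 + w[1] * 10**3 + w[2] * 10**2 + w[3] * 10 + w[4]
--     seen = {state: 0}
--     steps = 0
--     while True:
--         d = (w[0] + w[1] + w[2] + w[3] + w[4]) % 10
--         w = (w[1], w[2], w[3], w[4], d)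
--         state = (state * 10 + d) % MOD
--         steps += 1
--         if state in seen:
--             p = steps - seen[state]
--             break
--         seen[state] = steps
--     # Phase 2: recompute the k-th term directly from the initial window.
--     k = n % p
--     if k < 5:
--         return a[k]
--     w = (a[0], a[1], a[2], a[3], a[4])
--     for _ in range(k - 4):
--         w = (w[1], w[2], w[3], w[4], (w[0] + w[1] + w[2] + w[3] + w[4]) % 10)
--     return w[4]
-- ===== Notes on version B (the rewrite author's own statement) =====
-- stated objective: alternative
-- what changed: B replaces A's growing sequence list (appended to and indexed five times per step) by a rolling 5-tuple window with a state-to-step dict for period detection, then recomputes the n%p-th term directly from the initial window instead of indexing the stored sequence.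
import Mathlib
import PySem

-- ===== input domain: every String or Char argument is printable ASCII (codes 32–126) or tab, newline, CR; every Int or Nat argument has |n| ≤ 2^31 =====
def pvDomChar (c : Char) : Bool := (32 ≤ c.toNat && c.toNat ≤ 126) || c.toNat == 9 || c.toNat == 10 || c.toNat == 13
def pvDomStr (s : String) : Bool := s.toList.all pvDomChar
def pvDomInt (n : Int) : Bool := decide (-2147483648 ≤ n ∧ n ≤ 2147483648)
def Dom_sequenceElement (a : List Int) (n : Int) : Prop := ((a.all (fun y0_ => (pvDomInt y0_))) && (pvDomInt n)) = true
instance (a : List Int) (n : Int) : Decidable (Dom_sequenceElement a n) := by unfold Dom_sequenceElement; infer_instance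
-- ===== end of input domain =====

-- B keeps only a rolling 5-tuple window and a state→step map to find the period, then recomputes the
-- (n mod p)-th term directly from the initial window, instead of materialising and indexing the whole sequence.
-- Both Pythons' dicts are ported as Std.HashMap (used only via lookup/insert, never iterated: exact),
-- and A's list 'seq' as an Array (append = push; every index this loop uses is provably nonnegative and in range).

-- ===== PORT A =====
-- seq[j] for the nonnegative in-range indices A uses (i-1..i-5 with i ≥ 5, and n % (i-last) ∈ [0, i-4))
def pvAGet (s : Array Int) (j : Int) : Int := (s[j.toNat]?).getD 0

-- 'while True' loop rendered with fuel (0 on exhaustion; the Python loop repeats a state in [0,10^5))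
def pvLoopA (n : Int) : Nat → Array Int → Int → Std.HashMap Int Int → Int → Int
  | 0, _, _, _, _ => 0
  | fuel+1, seq, lastFive, was, i =>
    let new := PySem.Int.mod (pvAGet seq (i-1) + pvAGet seq (i-2) +
      pvAGet seq (i-3) + pvAGet seq (i-4) + pvAGet seq (i-5)) 10
    let seq2 := seq.push new
    let lastFive2 := PySem.Int.mod (lastFive * 10 + pvAGet seq2 i) 100000
    match was[lastFive2]? with
    | some last => pvAGet seq2 (PySem.Int.mod n (i - last))
    | none => pvLoopA n fuel seq2 lastFive2 (was.insert lastFive2 i) (i+1)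

def sequenceElement (a : List Int) (n : Int) : Int :=
  let seq := (PySem.List.pyRange 0 5 1).foldl (fun s j => s.push (PySem.List.pyGetD a j 0)) (#[] : Array Int)
  let lastFive := PySem.List.pyGetD a 0 0 * 10^4 + PySem.List.pyGetD a 1 0 * 10^3 +
    PySem.List.pyGetD a 2 0 * 10^2 + PySem.List.pyGetD a 3 0 * 10^1 + PySem.List.pyGetD a 4 0
  pvLoopA n 100011 seq lastFive ((∅ : Std.HashMap Int Int).insert lastFive 4) 5

-- ===== PORT B =====
def pvStep (w : Int × Int × Int × Int × Int) : Int × Int × Int × Int × Int :=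
  (w.2.1, w.2.2.1, w.2.2.2.1, w.2.2.2.2,
   PySem.Int.mod (w.1 + w.2.1 + w.2.2.1 + w.2.2.2.1 + w.2.2.2.2) 10)

def pvIter : Nat → Int × Int × Int × Int × Int → Int × Int × Int × Int × Int
  | 0, w => w
  | t+1, w => pvIter t (pvStep w)

-- phase 1 of B ('while True' with fuel; none on exhaustion): returns the period p
def pvDetect : Nat → Int × Int × Int × Int × Int → Int → Std.HashMap Int Int → Int → Option Int
  | 0, _, _, _, _ => none
  | fuel+1, w, state, seen, steps =>
    let w2 := pvStep w
    let state2 := PySem.Int.mod (state * 10 + w2.2.2.2.2) 100000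
    let steps2 := steps + 1
    match seen[state2]? with
    | some s => some (steps2 - s)
    | none => pvDetect fuel w2 state2 (seen.insert state2 steps2) steps2

def sequenceElement_alt (a : List Int) (n : Int) : Int :=
  let w0 : Int × Int × Int × Int × Int :=
    (PySem.List.pyGetD a 0 0, PySem.List.pyGetD a 1 0, PySem.List.pyGetD a 2 0,
     PySem.List.pyGetD a 3 0, PySem.List.pyGetD a 4 0)
  let state0 := w0.1 * 10^4 + w0.2.1 * 10^3 + w0.2.2.1 * 10^2 + w0.2.2.2.1 * 10^1 + w0.2.2.2.2
  match pvDetect 100011 w0 state0 ((∅ : Std.HashMap Int Int).insert state0 0) 0 with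
  | none => 0
  | some p =>
    let k := PySem.Int.mod n p
    if k < 5 then PySem.List.pyGetD a k 0
    else (pvIter (k - 4).toNat w0).2.2.2.2

-- ===== PRECONDITION & SPEC =====
-- Python A raises IndexError when len(a) < 5 (it reads a[0..4]); Pre_ excludes exactly those inputs.
def Pre_sequenceElement (a : List Int) (n : Int) : Prop := 5 ≤ a.length
instance (a : List Int) (n : Int) : Decidable (Pre_sequenceElement a n) := by unfold Pre_sequenceElement; infer_instance
def pvWitness_sequenceElement : List Int × Int := ([1, 2, 3, 4, 5], 7)

def Spec_sequenceElement (a : List Int) (n : Int) (out : Int) : Prop := out = sequenceElement_alt a n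
instance (a : List Int) (n : Int) (out : Int) : Decidable (Spec_sequenceElement a n out) := by unfold Spec_sequenceElement; infer_instance

-- ===== CLAIM (what is proved, stated in full; the proofs are below) =====
def Claim_equal_sequenceElement : Prop := ∀ (a : List Int) (n : Int), Dom_sequenceElement a n → Pre_sequenceElement a n → Spec_sequenceElement a n (sequenceElement a n)

-- ===== LEMMAS AND PROOFS =====

-- the initial window (a[0..4], missing entries read as 0 like the ports' total pyGetD)
def pvW0 (a : List Int) : Int × Int × Int × Int × Int :=
  (PySem.List.pyGetD a 0 0, PySem.List.pyGetD a 1 0, PySem.List.pyGetD a 2 0,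
   PySem.List.pyGetD a 3 0, PySem.List.pyGetD a 4 0)

-- the abstract digit-sum sequence both programs generate
def pvS (a : List Int) : Nat → Int
  | 0 => PySem.List.pyGetD a 0 0
  | 1 => PySem.List.pyGetD a 1 0
  | 2 => PySem.List.pyGetD a 2 0
  | 3 => PySem.List.pyGetD a 3 0
  | 4 => PySem.List.pyGetD a 4 0
  | k+5 => PySem.Int.mod (pvS a k + pvS a (k+1) + pvS a (k+2) + pvS a (k+3) + pvS a (k+4)) 10

theorem pvIter_succ' (t : Nat) (w : Int × Int × Int × Int × Int) :
    pvIter (t+1) w = pvStep (pvIter t w) := by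
  induction t generalizing w with
  | zero => rfl
  | succ t ih => rw [pvIter, ih]; rfl

theorem pvIter_eq (a : List Int) (t : Nat) :
    pvIter t (pvW0 a) = (pvS a t, pvS a (t+1), pvS a (t+2), pvS a (t+3), pvS a (t+4)) := by
  induction t with
  | zero => rfl
  | succ t ih =>
    rw [pvIter_succ', ih]
    show (pvS a (t+1), pvS a (t+2), pvS a (t+3), pvS a (t+4),
      PySem.Int.mod (pvS a t + pvS a (t+1) + pvS a (t+2) + pvS a (t+3) + pvS a (t+4)) 10) = _
    have h5 : pvS a (t+5) = PySem.Int.mod (pvS a t + pvS a (t+1) + pvS a (t+2) + pvS a (t+3) + pvS a (t+4)) 10 := by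
      conv_lhs => rw [pvS]
    rw [show t+1+1 = t+2 from rfl, show t+1+2 = t+3 from rfl, show t+1+3 = t+4 from rfl,
        show t+1+4 = t+5 from rfl, h5]

theorem pv_lockstep (a : List Int) (n : Int) (fuel : Nat) :
    ∀ (t : Nat) (seq : Array Int) (lastFive : Int) (was seen : Std.HashMap Int Int),
    seq.size = 5 + t →
    (∀ k : Nat, k < 5 + t → seq[k]? = some (pvS a k)) →
    (∀ key : Int, seen[key]? = (was[key]?).map (fun v => v - 4)) →
    (∀ (key v : Int), was[key]? = some v → 4 ≤ v ∧ v ≤ 4 + (t : Int)) →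
    pvLoopA n fuel seq lastFive was ((5 + t : Nat) : Int) =
      (match pvDetect fuel (pvIter t (pvW0 a)) lastFive seen (t : Int) with
       | none => 0
       | some p =>
         let k := PySem.Int.mod n p
         if k < 5 then PySem.List.pyGetD a k 0
         else (pvIter (k - 4).toNat (pvW0 a)).2.2.2.2) := by
  induction fuel with
  | zero => intro t seq lastFive was seen _ _ _ _; rfl
  | succ fuel ih =>
    intro t seq lastFive was seen hlen hseq hrel hval
    have hget : ∀ (m : Nat), m < 5 + t → pvAGet seq ((m : Nat) : Int) = pvS a m := by
      intro m hm
      unfold pvAGet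
      rw [Int.toNat_natCast, hseq m hm]
      rfl
    have e4 : ((5 + t : Nat) : Int) - 1 = ((t + 4 : Nat) : Int) := by push_cast; ring
    have e3 : ((5 + t : Nat) : Int) - 2 = ((t + 3 : Nat) : Int) := by push_cast; ring
    have e2 : ((5 + t : Nat) : Int) - 3 = ((t + 2 : Nat) : Int) := by push_cast; ring
    have e1 : ((5 + t : Nat) : Int) - 4 = ((t + 1 : Nat) : Int) := by push_cast; ring
    have e0 : ((5 + t : Nat) : Int) - 5 = ((t : Nat) : Int) := by push_cast; ring
    have hnew : PySem.Int.mod (pvAGet seq (((5 + t : Nat) : Int)-1) + pvAGet seq (((5 + t : Nat) : Int)-2) +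
        pvAGet seq (((5 + t : Nat) : Int)-3) + pvAGet seq (((5 + t : Nat) : Int)-4) +
        pvAGet seq (((5 + t : Nat) : Int)-5)) 10 = pvS a (t + 5) := by
      rw [e4, e3, e2, e1, e0, hget (t+4) (by omega), hget (t+3) (by omega), hget (t+2) (by omega),
          hget (t+1) (by omega), hget t (by omega)]
      conv_rhs => rw [pvS]
      congr 1
      ring
    have hpushlast : (seq.push (pvS a (t + 5)))[5 + t]? = some (pvS a (t + 5)) := by
      conv_lhs => rw [show 5 + t = seq.size from hlen.symm]
      simp
    have hlast : pvAGet (seq.push (pvS a (t + 5))) ((5 + t : Nat) : Int) = pvS a (t + 5) := by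
      unfold pvAGet
      rw [Int.toNat_natCast, hpushlast]
      rfl
    have hstep : pvStep (pvIter t (pvW0 a)) = pvIter (t+1) (pvW0 a) := (pvIter_succ' t _).symm
    have hd : (pvIter (t+1) (pvW0 a)).2.2.2.2 = pvS a (t + 5) := by
      rw [pvIter_eq]
    have hseq2 : ∀ m : Nat, m < 5 + t + 1 → (seq.push (pvS a (t + 5)))[m]? = some (pvS a m) := by
      intro m hm
      rcases Nat.lt_or_ge m (5 + t) with h | h
      · rw [Array.getElem?_push, if_neg (by omega), hseq m h]
      · have hm5 : m = 5 + t := by omega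
        subst hm5
        have ht : t + 5 = 5 + t := by omega
        rw [hpushlast, ht]
    rw [pvLoopA, pvDetect]
    simp only [hnew, hlast, hstep, hd]
    rw [hrel]
    rcases hcase : was[PySem.Int.mod (lastFive * 10 + pvS a (t + 5)) 100000]? with _ | last
    · -- no collision: recurse
      simp only [Option.map_none]
      have eA : ((5 + t : Nat) : Int) + 1 = ((5 + (t + 1) : Nat) : Int) := by push_cast; ring
      have eB : ((t : Nat) : Int) + 1 = ((t + 1 : Nat) : Int) := by push_cast; ring
      rw [eA, eB]
      have := ih (t+1) (seq.push (pvS a (t + 5)))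
        (PySem.Int.mod (lastFive * 10 + pvS a (t + 5)) 100000)
        (was.insert (PySem.Int.mod (lastFive * 10 + pvS a (t + 5)) 100000) ((5 + t : Nat) : Int))
        (seen.insert (PySem.Int.mod (lastFive * 10 + pvS a (t + 5)) 100000) (((t + 1 : Nat) : Int)))
        (by simp [hlen]; omega)
        (by intro m hm; exact hseq2 m (by omega))
        (by
          intro key
          by_cases hkey : key = PySem.Int.mod (lastFive * 10 + pvS a (t + 5)) 100000
          · subst hkey
            simp
            ring
          · simp only [Std.HashMap.getElem?_insert]
            rw [if_neg (by simpa using (Ne.symm hkey)), if_neg (by simpa using (Ne.symm hkey))]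
            exact hrel key)
        (by
          intro key v hv
          by_cases hkey : key = PySem.Int.mod (lastFive * 10 + pvS a (t + 5)) 100000
          · subst hkey
            rw [Std.HashMap.getElem?_insert, if_pos (by simp)] at hv
            cases hv
            refine ⟨by push_cast; omega, by push_cast; omega⟩
          · rw [Std.HashMap.getElem?_insert, if_neg (by simpa using (Ne.symm hkey))] at hv
            have := hval key v hv
            push_cast at this ⊢
            omega)
      exact this
    · -- collision: both stop with the same period
      simp only [Option.map_some]
      obtain ⟨hl4, hlt⟩ := hval _ _ hcase
      have hp : ((t : Nat) : Int) + 1 - (last - 4) = ((5 + t : Nat) : Int) - last := by push_cast; ring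
      rw [hp]
      set p := ((5 + t : Nat) : Int) - last with hpdef
      have hppos : 0 < p := by simp only [hpdef]; push_cast; omega
      have hple : p ≤ (t : Int) + 1 := by simp only [hpdef]; push_cast; omega
      set k := PySem.Int.mod n p with hkdef
      have hk0 : 0 ≤ k := PySem.Int.mod_nonneg n hppos
      have hk1 : k < p := PySem.Int.mod_lt n hppos
      have hA : pvAGet (seq.push (pvS a (t + 5))) k = pvS a k.toNat := by
        unfold pvAGet
        rw [hseq2 k.toNat (by omega)]
        rfl
      rw [hA]
      by_cases hk5 : k < 5
      · simp only [if_pos hk5]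
        interval_cases k <;> rfl
      · simp only [if_neg hk5]
        rw [pvIter_eq]
        have : (k - 4).toNat + 4 = k.toNat := by omega
        rw [this]

-- ===== VERDICT (by name: the statement is the Claim_ definition above) =====
theorem sequenceElement_spec : Claim_equal_sequenceElement := by
  unfold Claim_equal_sequenceElement
  intro a n _ _
  unfold Spec_sequenceElement
  have hmain := pv_lockstep a n 100011 0
    #[PySem.List.pyGetD a 0 0, PySem.List.pyGetD a 1 0, PySem.List.pyGetD a 2 0,
      PySem.List.pyGetD a 3 0, PySem.List.pyGetD a 4 0]
    (PySem.List.pyGetD a 0 0 * 10^4 + PySem.List.pyGetD a 1 0 * 10^3 +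
     PySem.List.pyGetD a 2 0 * 10^2 + PySem.List.pyGetD a 3 0 * 10^1 + PySem.List.pyGetD a 4 0)
    ((∅ : Std.HashMap Int Int).insert (PySem.List.pyGetD a 0 0 * 10^4 + PySem.List.pyGetD a 1 0 * 10^3 +
      PySem.List.pyGetD a 2 0 * 10^2 + PySem.List.pyGetD a 3 0 * 10^1 + PySem.List.pyGetD a 4 0) 4)
    ((∅ : Std.HashMap Int Int).insert (PySem.List.pyGetD a 0 0 * 10^4 + PySem.List.pyGetD a 1 0 * 10^3 +
      PySem.List.pyGetD a 2 0 * 10^2 + PySem.List.pyGetD a 3 0 * 10^1 + PySem.List.pyGetD a 4 0) 0)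
    (by rfl)
    (by intro k hk; interval_cases k <;> rfl)
    (by
      intro key
      by_cases hkey : key = PySem.List.pyGetD a 0 0 * 10^4 + PySem.List.pyGetD a 1 0 * 10^3 +
        PySem.List.pyGetD a 2 0 * 10^2 + PySem.List.pyGetD a 3 0 * 10^1 + PySem.List.pyGetD a 4 0
      · subst hkey
        simp
      · simp only [Std.HashMap.getElem?_insert]
        rw [if_neg (by simpa using (Ne.symm hkey)), if_neg (by simpa using (Ne.symm hkey))]
        simp)
    (by
      intro key v hv
      by_cases hkey : key = PySem.List.pyGetD a 0 0 * 10^4 + PySem.List.pyGetD a 1 0 * 10^3 +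
        PySem.List.pyGetD a 2 0 * 10^2 + PySem.List.pyGetD a 3 0 * 10^1 + PySem.List.pyGetD a 4 0
      · subst hkey
        rw [Std.HashMap.getElem?_insert, if_pos (by simp)] at hv
        cases hv
        exact ⟨by omega, by omega⟩
      · rw [Std.HashMap.getElem?_insert, if_neg (by simpa using (Ne.symm hkey))] at hv
        simp at hv)
  exact hmain
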